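-- pv_equiv track=rewrite | github.com/pypi-data/pypi-mirror-366 | packages/dana/dana-0.25.8.1.dev1-py3-none-any.whl/dana/frameworks/knows/extraction/meta/extractor.py | _is_potentially_important
-- ===== SOURCE A (Python) =====
-- def _is_potentially_important(sentence: str) -> bool:
--     """Check if a sentence contains potentially important information.
--
--     Args:
--         sentence: Sentence to check
--
--     Returns:
--         True if sentence seems important
--     """
--     # Simple heuristics for identifying important sentences
--     important_indicators = [
--         'process', 'workflow', 'step', 'procedure',
--         'requirement', 'specification', 'standard',
--         'metric', 'performance', 'accuracy', 'efficiency',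
--         'problem', 'issue', 'challenge', 'solution',
--         'best practice', 'recommendation', 'guideline',
--         'key', 'important', 'critical', 'essential',
--         'algorithm', 'method', 'approach', 'technique'
--     ]
--
--     sentence_lower = sentence.lower()
--     return any(indicator in sentence_lower for indicator in important_indicators)
-- ===== SOURCE B (Python) =====
-- # Keywords indexed by first letter: scan the sentence once, and at each
-- # position only test the suffixes of keywords that start with that character.
-- _KEYWORD_SUFFIXES = {
--     'p': ['rocess', 'rocedure', 'erformance', 'roblem'],
--     'w': ['orkflow'],
--     's': ['tep', 'pecification', 'tandard', 'olution'],
--     'r': ['equirement', 'ecommendation'],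
--     'm': ['etric', 'ethod'],
--     'a': ['ccuracy', 'lgorithm', 'pproach'],
--     'e': ['fficiency', 'ssential'],
--     'i': ['ssue', 'mportant'],
--     'c': ['hallenge', 'ritical'],
--     'b': ['est practice'],
--     'g': ['uideline'],
--     'k': ['ey'],
--     't': ['echnique'],
-- }
--
--
-- def _is_potentially_important(sentence: str) -> bool:
--     s = sentence.lower()
--     for i, c in enumerate(s):
--         for suf in _KEYWORD_SUFFIXES.get(c, ()):
--             if s.startswith(suf, i + 1):
--                 return True
--     return False
-- ===== Notes on version B (the rewrite author's own statement) =====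
-- stated objective: alternative
-- what changed: Instead of one full substring search per keyword (any(kw in s)), B scans the sentence once and at each position consults a dict keyed by first character, testing only the suffixes of keywords whose first letter matches there.
import Mathlib
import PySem

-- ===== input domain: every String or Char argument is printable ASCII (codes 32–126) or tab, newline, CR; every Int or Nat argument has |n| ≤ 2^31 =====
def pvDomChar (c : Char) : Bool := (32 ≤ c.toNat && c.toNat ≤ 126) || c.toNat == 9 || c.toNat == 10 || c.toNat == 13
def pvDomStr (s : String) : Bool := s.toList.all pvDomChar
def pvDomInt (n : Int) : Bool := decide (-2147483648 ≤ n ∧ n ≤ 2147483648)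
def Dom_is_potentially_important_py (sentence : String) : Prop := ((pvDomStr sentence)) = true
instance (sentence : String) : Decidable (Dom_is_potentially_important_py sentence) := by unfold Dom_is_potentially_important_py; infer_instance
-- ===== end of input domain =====

-- B replaces A's 26 independent substring searches by one left-to-right scan that,
-- at each position, looks the current character up in a dict keyed by the keywords'
-- first letters and tests only the matching suffixes (alternative decomposition).

-- ===== PORT A =====
-- the literal keyword list of A
def importantIndicators : List String :=
  ["process", "workflow", "step", "procedure",
   "requirement", "specification", "standard",
   "metric", "performance", "accuracy", "efficiency",
   "problem", "issue", "challenge", "solution",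
   "best practice", "recommendation", "guideline",
   "key", "important", "critical", "essential",
   "algorithm", "method", "approach", "technique"]

def is_potentially_important_py (sentence : String) : Bool :=
  let sentence_lower := PySem.Str.lower sentence
  importantIndicators.any (fun indicator => PySem.Str.isIn indicator sentence_lower)

-- ===== PORT B =====
-- Source B's dict: keyword suffixes keyed by the keyword's first character
def keywordSuffixes : PySem.Dict Char (List String) :=
  PySem.Dict.ofList
    [('p', ["rocess", "rocedure", "erformance", "roblem"]),
     ('w', ["orkflow"]),
     ('s', ["tep", "pecification", "tandard", "olution"]),
     ('r', ["equirement", "ecommendation"]),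
     ('m', ["etric", "ethod"]),
     ('a', ["ccuracy", "lgorithm", "pproach"]),
     ('e', ["fficiency", "ssential"]),
     ('i', ["ssue", "mportant"]),
     ('c', ["hallenge", "ritical"]),
     ('b', ["est practice"]),
     ('g', ["uideline"]),
     ('k', ["ey"]),
     ('t', ["echnique"])]

-- the loop of Source B: for i, c in enumerate(s): for suf in dict.get(c, ()):
--   if s.startswith(suf, i + 1): return True
def pvDispatchScan : List Char → Bool
  | [] => false
  | c :: rest =>
    (PySem.Dict.getD keywordSuffixes c []).any
      (fun suf => PySem.Chars.startswith rest suf.toList) || pvDispatchScan rest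

def is_potentially_important_py_alt (sentence : String) : Bool :=
  pvDispatchScan (PySem.Str.lower sentence).toList

-- ===== PRECONDITION & SPEC =====
def Spec_is_potentially_important_py (sentence : String) (out : Bool) : Prop := out = is_potentially_important_py_alt sentence
instance (sentence : String) (out : Bool) : Decidable (Spec_is_potentially_important_py sentence out) := by unfold Spec_is_potentially_important_py; infer_instance

-- ===== CLAIM (what is proved, stated in full; the proofs are below) =====
def Claim_equal_is_potentially_important_py : Prop := ∀ (sentence : String), Dom_is_potentially_important_py sentence → Spec_is_potentially_important_py sentence (is_potentially_important_py sentence)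

-- ===== LEMMAS AND PROOFS =====

lemma pvLookup_mem (c : Char) (suf : String)
    (h : suf ∈ PySem.Dict.getD keywordSuffixes c []) :
    importantIndicators.any (fun kw => kw.toList == c :: suf.toList) = true := by
  cases hcont : PySem.Dict.contains keywordSuffixes c with
  | false =>
    rw [PySem.Dict.getD_of_not_contains keywordSuffixes _ hcont] at h
    cases h
  | true =>
    rw [PySem.Dict.contains_eq_isSome_get?] at hcont
    obtain ⟨l, hget⟩ := Option.isSome_iff_exists.mp hcont
    have hitems := PySem.Dict.mem_items_of_get?_eq_some keywordSuffixes hget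
    rw [PySem.Dict.getD_of_get?_eq_some keywordSuffixes _ hget] at h
    rw [show keywordSuffixes.items =
      [('p', ["rocess", "rocedure", "erformance", "roblem"]),
       ('w', ["orkflow"]),
       ('s', ["tep", "pecification", "tandard", "olution"]),
       ('r', ["equirement", "ecommendation"]),
       ('m', ["etric", "ethod"]),
       ('a', ["ccuracy", "lgorithm", "pproach"]),
       ('e', ["fficiency", "ssential"]),
       ('i', ["ssue", "mportant"]),
       ('c', ["hallenge", "ritical"]),
       ('b', ["est practice"]),
       ('g', ["uideline"]),
       ('k', ["ey"]),
       ('t', ["echnique"])] from by decide] at hitems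
    simp only [List.mem_cons, List.not_mem_nil, or_false, Prod.mk.injEq] at hitems
    rcases hitems with ⟨rfl, rfl⟩|⟨rfl, rfl⟩|⟨rfl, rfl⟩|⟨rfl, rfl⟩|⟨rfl, rfl⟩|⟨rfl, rfl⟩|⟨rfl, rfl⟩|⟨rfl, rfl⟩|⟨rfl, rfl⟩|⟨rfl, rfl⟩|⟨rfl, rfl⟩|⟨rfl, rfl⟩|⟨rfl, rfl⟩ <;> fin_cases h <;> decide

lemma pvKw_mem_lookup (kw : String) (hkw : kw ∈ importantIndicators)
    (c : Char) (rest : List Char) (hpre : kw.toList <+: c :: rest) :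
    (PySem.Dict.getD keywordSuffixes c []).any
      (fun suf => PySem.Chars.startswith rest suf.toList) = true := by
  simp only [importantIndicators, List.mem_cons, List.not_mem_nil, or_false] at hkw
  rcases hkw with rfl|rfl|rfl|rfl|rfl|rfl|rfl|rfl|rfl|rfl|rfl|rfl|rfl|rfl|rfl|rfl|rfl|rfl|rfl|rfl|rfl|rfl|rfl|rfl|rfl|rfl
  · rw [show ("process").toList = 'p' :: ("rocess").toList from by decide,
      List.cons_prefix_cons] at hpre
    obtain ⟨rfl, ht⟩ := hpre
    refine List.any_eq_true.mpr ⟨"rocess", by decide, ?_⟩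
    rw [PySem.Chars.startswith_iff]; exact ht
  · rw [show ("workflow").toList = 'w' :: ("orkflow").toList from by decide,
      List.cons_prefix_cons] at hpre
    obtain ⟨rfl, ht⟩ := hpre
    refine List.any_eq_true.mpr ⟨"orkflow", by decide, ?_⟩
    rw [PySem.Chars.startswith_iff]; exact ht
  · rw [show ("step").toList = 's' :: ("tep").toList from by decide,
      List.cons_prefix_cons] at hpre
    obtain ⟨rfl, ht⟩ := hpre
    refine List.any_eq_true.mpr ⟨"tep", by decide, ?_⟩
    rw [PySem.Chars.startswith_iff]; exact ht
  · rw [show ("procedure").toList = 'p' :: ("rocedure").toList from by decide,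
      List.cons_prefix_cons] at hpre
    obtain ⟨rfl, ht⟩ := hpre
    refine List.any_eq_true.mpr ⟨"rocedure", by decide, ?_⟩
    rw [PySem.Chars.startswith_iff]; exact ht
  · rw [show ("requirement").toList = 'r' :: ("equirement").toList from by decide,
      List.cons_prefix_cons] at hpre
    obtain ⟨rfl, ht⟩ := hpre
    refine List.any_eq_true.mpr ⟨"equirement", by decide, ?_⟩
    rw [PySem.Chars.startswith_iff]; exact ht
  · rw [show ("specification").toList = 's' :: ("pecification").toList from by decide,
      List.cons_prefix_cons] at hpre
    obtain ⟨rfl, ht⟩ := hpre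
    refine List.any_eq_true.mpr ⟨"pecification", by decide, ?_⟩
    rw [PySem.Chars.startswith_iff]; exact ht
  · rw [show ("standard").toList = 's' :: ("tandard").toList from by decide,
      List.cons_prefix_cons] at hpre
    obtain ⟨rfl, ht⟩ := hpre
    refine List.any_eq_true.mpr ⟨"tandard", by decide, ?_⟩
    rw [PySem.Chars.startswith_iff]; exact ht
  · rw [show ("metric").toList = 'm' :: ("etric").toList from by decide,
      List.cons_prefix_cons] at hpre
    obtain ⟨rfl, ht⟩ := hpre
    refine List.any_eq_true.mpr ⟨"etric", by decide, ?_⟩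
    rw [PySem.Chars.startswith_iff]; exact ht
  · rw [show ("performance").toList = 'p' :: ("erformance").toList from by decide,
      List.cons_prefix_cons] at hpre
    obtain ⟨rfl, ht⟩ := hpre
    refine List.any_eq_true.mpr ⟨"erformance", by decide, ?_⟩
    rw [PySem.Chars.startswith_iff]; exact ht
  · rw [show ("accuracy").toList = 'a' :: ("ccuracy").toList from by decide,
      List.cons_prefix_cons] at hpre
    obtain ⟨rfl, ht⟩ := hpre
    refine List.any_eq_true.mpr ⟨"ccuracy", by decide, ?_⟩
    rw [PySem.Chars.startswith_iff]; exact ht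
  · rw [show ("efficiency").toList = 'e' :: ("fficiency").toList from by decide,
      List.cons_prefix_cons] at hpre
    obtain ⟨rfl, ht⟩ := hpre
    refine List.any_eq_true.mpr ⟨"fficiency", by decide, ?_⟩
    rw [PySem.Chars.startswith_iff]; exact ht
  · rw [show ("problem").toList = 'p' :: ("roblem").toList from by decide,
      List.cons_prefix_cons] at hpre
    obtain ⟨rfl, ht⟩ := hpre
    refine List.any_eq_true.mpr ⟨"roblem", by decide, ?_⟩
    rw [PySem.Chars.startswith_iff]; exact ht
  · rw [show ("issue").toList = 'i' :: ("ssue").toList from by decide,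
      List.cons_prefix_cons] at hpre
    obtain ⟨rfl, ht⟩ := hpre
    refine List.any_eq_true.mpr ⟨"ssue", by decide, ?_⟩
    rw [PySem.Chars.startswith_iff]; exact ht
  · rw [show ("challenge").toList = 'c' :: ("hallenge").toList from by decide,
      List.cons_prefix_cons] at hpre
    obtain ⟨rfl, ht⟩ := hpre
    refine List.any_eq_true.mpr ⟨"hallenge", by decide, ?_⟩
    rw [PySem.Chars.startswith_iff]; exact ht
  · rw [show ("solution").toList = 's' :: ("olution").toList from by decide,
      List.cons_prefix_cons] at hpre
    obtain ⟨rfl, ht⟩ := hpre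
    refine List.any_eq_true.mpr ⟨"olution", by decide, ?_⟩
    rw [PySem.Chars.startswith_iff]; exact ht
  · rw [show ("best practice").toList = 'b' :: ("est practice").toList from by decide,
      List.cons_prefix_cons] at hpre
    obtain ⟨rfl, ht⟩ := hpre
    refine List.any_eq_true.mpr ⟨"est practice", by decide, ?_⟩
    rw [PySem.Chars.startswith_iff]; exact ht
  · rw [show ("recommendation").toList = 'r' :: ("ecommendation").toList from by decide,
      List.cons_prefix_cons] at hpre
    obtain ⟨rfl, ht⟩ := hpre
    refine List.any_eq_true.mpr ⟨"ecommendation", by decide, ?_⟩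
    rw [PySem.Chars.startswith_iff]; exact ht
  · rw [show ("guideline").toList = 'g' :: ("uideline").toList from by decide,
      List.cons_prefix_cons] at hpre
    obtain ⟨rfl, ht⟩ := hpre
    refine List.any_eq_true.mpr ⟨"uideline", by decide, ?_⟩
    rw [PySem.Chars.startswith_iff]; exact ht
  · rw [show ("key").toList = 'k' :: ("ey").toList from by decide,
      List.cons_prefix_cons] at hpre
    obtain ⟨rfl, ht⟩ := hpre
    refine List.any_eq_true.mpr ⟨"ey", by decide, ?_⟩
    rw [PySem.Chars.startswith_iff]; exact ht
  · rw [show ("important").toList = 'i' :: ("mportant").toList from by decide,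
      List.cons_prefix_cons] at hpre
    obtain ⟨rfl, ht⟩ := hpre
    refine List.any_eq_true.mpr ⟨"mportant", by decide, ?_⟩
    rw [PySem.Chars.startswith_iff]; exact ht
  · rw [show ("critical").toList = 'c' :: ("ritical").toList from by decide,
      List.cons_prefix_cons] at hpre
    obtain ⟨rfl, ht⟩ := hpre
    refine List.any_eq_true.mpr ⟨"ritical", by decide, ?_⟩
    rw [PySem.Chars.startswith_iff]; exact ht
  · rw [show ("essential").toList = 'e' :: ("ssential").toList from by decide,
      List.cons_prefix_cons] at hpre
    obtain ⟨rfl, ht⟩ := hpre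
    refine List.any_eq_true.mpr ⟨"ssential", by decide, ?_⟩
    rw [PySem.Chars.startswith_iff]; exact ht
  · rw [show ("algorithm").toList = 'a' :: ("lgorithm").toList from by decide,
      List.cons_prefix_cons] at hpre
    obtain ⟨rfl, ht⟩ := hpre
    refine List.any_eq_true.mpr ⟨"lgorithm", by decide, ?_⟩
    rw [PySem.Chars.startswith_iff]; exact ht
  · rw [show ("method").toList = 'm' :: ("ethod").toList from by decide,
      List.cons_prefix_cons] at hpre
    obtain ⟨rfl, ht⟩ := hpre
    refine List.any_eq_true.mpr ⟨"ethod", by decide, ?_⟩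
    rw [PySem.Chars.startswith_iff]; exact ht
  · rw [show ("approach").toList = 'a' :: ("pproach").toList from by decide,
      List.cons_prefix_cons] at hpre
    obtain ⟨rfl, ht⟩ := hpre
    refine List.any_eq_true.mpr ⟨"pproach", by decide, ?_⟩
    rw [PySem.Chars.startswith_iff]; exact ht
  · rw [show ("technique").toList = 't' :: ("echnique").toList from by decide,
      List.cons_prefix_cons] at hpre
    obtain ⟨rfl, ht⟩ := hpre
    refine List.any_eq_true.mpr ⟨"echnique", by decide, ?_⟩
    rw [PySem.Chars.startswith_iff]; exact ht
-- at one position: the dispatched suffix checks succeed iff some full keyword is a prefix here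
lemma pvDispatch_pos_iff (c : Char) (rest : List Char) :
    ((PySem.Dict.getD keywordSuffixes c []).any
        (fun suf => PySem.Chars.startswith rest suf.toList) = true)
    ↔ ∃ kw ∈ importantIndicators, kw.toList <+: c :: rest := by
  constructor
  · intro h
    obtain ⟨suf, hsuf, hsw⟩ := List.any_eq_true.mp h
    obtain ⟨kw, hkw, hkweq⟩ := List.any_eq_true.mp (pvLookup_mem c suf hsuf)
    refine ⟨kw, hkw, ?_⟩
    rw [eq_of_beq hkweq]
    exact List.cons_prefix_cons.mpr ⟨rfl, (PySem.Chars.startswith_iff _ _).mp hsw⟩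
  · rintro ⟨kw, hkw, hpre⟩
    exact pvKw_mem_lookup kw hkw c rest hpre

-- the scan finds a hit iff some keyword is a prefix of some suffix of the sentence
lemma pvDispatchScan_iff (l : List Char) :
    pvDispatchScan l = true ↔ ∃ kw ∈ importantIndicators, ∃ j, kw.toList <+: l.drop j := by
  induction l with
  | nil =>
    simp only [pvDispatchScan, List.drop_nil]
    constructor
    · intro h; cases h
    · rintro ⟨kw, hkw, j, hpre⟩
      have hne : ∀ kw ∈ importantIndicators, kw.toList ≠ [] := by decide
      exact absurd (List.prefix_nil.mp hpre) (hne kw hkw)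
  | cons c rest ih =>
    simp only [pvDispatchScan, Bool.or_eq_true, ih, pvDispatch_pos_iff]
    constructor
    · rintro (⟨kw, hkw, hpre⟩ | ⟨kw, hkw, j, hpre⟩)
      · exact ⟨kw, hkw, 0, by simpa using hpre⟩
      · exact ⟨kw, hkw, j + 1, by simpa using hpre⟩
    · rintro ⟨kw, hkw, j, hpre⟩
      cases j with
      | zero => exact Or.inl ⟨kw, hkw, by simpa using hpre⟩
      | succ j => exact Or.inr ⟨kw, hkw, j, by simpa using hpre⟩

theorem is_potentially_important_py_equiv (sentence : String) :
    is_potentially_important_py sentence = is_potentially_important_py_alt sentence := by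
  unfold is_potentially_important_py is_potentially_important_py_alt
  apply Bool.eq_iff_iff.mpr
  rw [List.any_eq_true, pvDispatchScan_iff]
  constructor
  · rintro ⟨kw, hkw, hin⟩
    have h := (PySem.Str.isIn_iff_infix _ _).mp hin
    obtain ⟨j, hpre⟩ := (PySem.Chars.exists_prefix_drop_iff_isIn _ _).mpr
      ((PySem.Chars.isIn_iff_infix _ _).mpr h)
    exact ⟨kw, hkw, j, hpre⟩
  · rintro ⟨kw, hkw, j, hpre⟩
    refine ⟨kw, hkw, (PySem.Str.isIn_iff_infix _ _).mpr ?_⟩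
    exact (PySem.Chars.isIn_iff_infix _ _).mp
      ((PySem.Chars.exists_prefix_drop_iff_isIn _ _).mp ⟨j, hpre⟩)

-- ===== VERDICT (by name: the statement is the Claim_ definition above) =====
theorem is_potentially_important_py_spec : Claim_equal_is_potentially_important_py := by
  intro sentence _
  exact is_potentially_important_py_equiv sentence
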